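-- pv_equiv track=rewrite | github.com/AlvarTR/DCP | Code/#310 Set bits in a sequence.py | lock_histories
-- ===== SOURCE A (Python) =====
-- def bits_set_in(number: int) -> list:
--
--     if (number < 0):
--         return None
--
--     bits_set: list[int] = []
--
--     aux_number: int = number
--     bit_index: int = 0
--     while (aux_number > 0):
--         is_set: bool = aux_number & 1
--         if (is_set):
--             bits_set.append(bit_index)
--         aux_number >>= 1
--         bit_index += 1
--     return bits_set
--
-- def history_of_bits_set_for_powers_of_two():
--     history = 1
--     yield history
--
--     offset = 0
--     while True:
--         history *= 2
--         history += offset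
--
--         offset *= 2
--         offset += 1
--
--         yield history
--
-- def lock_histories(number: int):
--     if (number < 0):
--         return -1
--
--     if (number == 0):
--         return 0
--
--     bits_set_in_number = bits_set_in(number)
--     bits_set_in_number.reverse()
--
--     history = history_of_bits_set_for_powers_of_two()
--     histories = [ next(history) for _ in range(bits_set_in_number[0]+1) ]
--
--     accumulator = 0
--     for locked_bits, bit in enumerate(bits_set_in_number):
--         accumulator += histories[bit]
--         accumulator += locked_bits * (2**bit)
--
--     return accumulator
-- ===== SOURCE B (Python) =====
-- def lock_histories(number: int):
--     if (number < 0):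
--         return -1
--
--     if (number == 0):
--         return 0
--
--     total = 0
--     prefix = 0  # value of the set bits already processed
--     bit = 0
--     n = number
--     while n > 0:
--         if n & 1:
--             p = 1 << bit
--             total += bit * p // 2 + 1 + prefix
--             prefix += p
--         n >>= 1
--         bit += 1
--     return total
-- ===== Notes on version B (the rewrite author's own statement) =====
-- stated objective: simpler
-- what changed: B drops A's bit-index list with its in-place reverse and the generator-built histories table: one ascending pass over the bits adds a closed-form history value per set bit plus a running prefix value that replaces the descending enumeration's counter-weighted terms.
import Mathlib
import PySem

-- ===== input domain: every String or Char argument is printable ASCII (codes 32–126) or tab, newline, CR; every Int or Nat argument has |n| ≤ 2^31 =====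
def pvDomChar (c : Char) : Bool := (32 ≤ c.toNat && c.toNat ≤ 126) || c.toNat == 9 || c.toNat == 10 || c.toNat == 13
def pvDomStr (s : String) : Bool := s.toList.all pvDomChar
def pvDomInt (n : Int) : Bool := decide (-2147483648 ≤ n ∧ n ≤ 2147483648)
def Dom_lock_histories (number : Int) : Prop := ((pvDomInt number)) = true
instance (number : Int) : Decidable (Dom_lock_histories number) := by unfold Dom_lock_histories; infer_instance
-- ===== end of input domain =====

-- B replaces A's bit-list + reverse + generator-built histories table by one ascending
-- pass over the bits using a closed-form history value per set bit and a running
-- prefix value (objective: simpler — no intermediate lists, one loop).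

-- ===== PORT A =====

-- while-loop of bits_set_in: collects the indices of the set bits of aux, ascending.
-- Python 'if (is_set)' with is_set = aux & 1 is truthy iff aux & 1 = 1 (aux > 0 here keeps aux & 1 in {0,1};
-- for aux ≤ 0 the loop body is never entered).
def bitsLoop (aux : Int) (idx : Int) : List Int :=
  if 0 < aux then
    (if PySem.Int.band aux 1 = 1 then [idx] else []) ++ bitsLoop (aux >>> (1:Nat)) (idx + 1)
  else []
termination_by aux.toNat
decreasing_by
  rename_i h
  simp only [Int.shiftRight_eq_div_pow, pow_one]
  omega

-- the generator history_of_bits_set_for_powers_of_two, unrolled m times: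
-- first yield is h itself, every later yield first updates (h, off) := (h*2 + off, off*2 + 1).
def histTake : Nat → Int → Int → List Int
  | 0, _, _ => []
  | m + 1, h, off => h :: histTake m (h * 2 + off) (off * 2 + 1)

def lock_histories (number : Int) : Int :=
  if number < 0 then -1
  else if number = 0 then 0
  else
    let bits := (bitsLoop number 0).reverse
    -- histories = [next(history) for _ in range(bits[0]+1)]; bits[0] exists since number > 0
    let histories := histTake (PySem.List.pyGetD bits 0 0 + 1).toNat 1 0
    -- for locked_bits, bit in enumerate(bits): acc += histories[bit]; acc += locked_bits * 2**bit
    -- (bit ≥ 0 always, so 2**bit is 2 ^ bit.toNat)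
    (PySem.List.enumerate bits 0).foldl
      (fun acc lb => acc + PySem.List.pyGetD histories lb.2 0 + lb.1 * 2 ^ lb.2.toNat) 0

-- ===== PORT B =====

-- the while-loop of B: state (n, bit, prefix, total); bit ≥ 0 throughout, so
-- 1 << bit is 1 <<< bit.toNat.
def lockLoop (n : Int) (bit : Int) (pfx : Int) (total : Int) : Int :=
  if 0 < n then
    if PySem.Int.band n 1 = 1 then
      let p : Int := (1:Int) <<< bit.toNat
      lockLoop (n >>> (1:Nat)) (bit + 1) (pfx + p)
        (total + (PySem.Int.floordiv (bit * p) 2 + 1 + pfx))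
    else lockLoop (n >>> (1:Nat)) (bit + 1) pfx total
  else total
termination_by n.toNat
decreasing_by
  all_goals
    rename_i h _
    simp only [Int.shiftRight_eq_div_pow, pow_one]
    omega

def lock_histories_alt (number : Int) : Int :=
  if number < 0 then -1
  else if number = 0 then 0
  else lockLoop number 0 0 0

-- ===== PRECONDITION & SPEC =====
def Spec_lock_histories (number : Int) (out : Int) : Prop := out = lock_histories_alt number
instance (number : Int) (out : Int) : Decidable (Spec_lock_histories number out) := by unfold Spec_lock_histories; infer_instance

-- ===== CLAIM (what is proved, stated in full; the proofs are below) =====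
def Claim_equal_lock_histories : Prop := ∀ (number : Int), Dom_lock_histories number → Spec_lock_histories number (lock_histories number)

-- ===== LEMMAS AND PROOFS =====

-- the closed-form history value: hVal b = histories[b] = b*2^b//2 + 1
def hVal (b : Int) : Int := b * 2 ^ b.toNat / 2 + 1

-- what B's loop adds for a bit list, given the running prefix value
def payoff : List Int → Int → Int
  | [], _ => 0
  | x :: xs, p => hVal x + p + payoff xs (p + 2 ^ x.toNat)

-- what A's enumerate-fold adds for a bit list, given the running locked_bits counter
def phi : List Int → Int → Int
  | [], _ => 0
  | x :: xs, l => hVal x + l * 2 ^ x.toNat + phi xs (l + 1)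

def weight (xs : List Int) : Int := (xs.map (fun x => (2:Int) ^ x.toNat)).sum

theorem band_one_eq_emod (a : Int) : PySem.Int.band a 1 = a % 2 := by
  rw [PySem.Int.band_one, PySem.Int.mod_eq_emod_of_pos (by norm_num)]

theorem shiftRight_one_eq (a : Int) : a >>> (1:Nat) = a / 2 := by
  simp [Int.shiftRight_eq_div_pow]

theorem bitsLoop_pos {aux : Int} (idx : Int) (h : 0 < aux) :
    bitsLoop aux idx = (if aux % 2 = 1 then [idx] else []) ++ bitsLoop (aux / 2) (idx + 1) := by
  rw [bitsLoop.eq_def]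
  simp [h, band_one_eq_emod, shiftRight_one_eq]

theorem bitsLoop_le : ∀ (m : Nat) (aux idx : Int), aux.toNat ≤ m →
    ∀ x ∈ bitsLoop aux idx, idx ≤ x := by
  intro m
  induction m with
  | zero =>
    intro aux idx hm x hx
    unfold bitsLoop at hx
    simp only [show ¬ (0 < aux) by omega, if_false] at hx
    simp at hx
  | succ m ih =>
    intro aux idx hm x hx
    by_cases h : 0 < aux
    · rw [bitsLoop_pos idx h] at hx
      rcases List.mem_append.mp hx with h1 | h2
      · split_ifs at h1 <;> simp_all
      · have := ih (aux / 2) (idx + 1) (by omega) x h2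
        omega
    · unfold bitsLoop at hx
      simp [h] at hx

theorem bitsLoop_sorted : ∀ (m : Nat) (aux idx : Int), aux.toNat ≤ m →
    (bitsLoop aux idx).Pairwise (· < ·) := by
  intro m
  induction m with
  | zero =>
    intro aux idx hm
    unfold bitsLoop
    simp only [show ¬ (0 < aux) by omega, if_false]
    exact List.Pairwise.nil
  | succ m ih =>
    intro aux idx hm
    by_cases h : 0 < aux
    · rw [bitsLoop_pos idx h]
      apply List.pairwise_append.mpr
      refine ⟨?_, ih (aux / 2) (idx + 1) (by omega), ?_⟩
      · split_ifs <;> simp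
      · intro a ha b hb
        have hb' := bitsLoop_le m (aux / 2) (idx + 1) (by omega) b hb
        split_ifs at ha <;> simp_all
    · unfold bitsLoop
      simp [h]

theorem bitsLoop_ne_nil : ∀ (m : Nat) (aux idx : Int), aux.toNat ≤ m → 0 < aux →
    bitsLoop aux idx ≠ [] := by
  intro m
  induction m with
  | zero => intro aux idx hm h; omega
  | succ m ih =>
    intro aux idx hm h
    rw [bitsLoop_pos idx h]
    by_cases hp : aux % 2 = 1
    · simp [hp]
    · have h2 : 0 < aux / 2 := by omega
      have := ih (aux / 2) (idx + 1) (by omega) h2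
      simp [hp, this]

-- B's loop computes payoff of the ascending bit list
theorem lockLoop_eq : ∀ (m : Nat) (n bit pfx total : Int), n.toNat ≤ m →
    lockLoop n bit pfx total = total + payoff (bitsLoop n bit) pfx := by
  intro m
  induction m with
  | zero =>
    intro n bit pfx total hm
    unfold lockLoop bitsLoop
    simp [show ¬ (0 < n) by omega, payoff]
  | succ m ih =>
    intro n bit pfx total hm
    by_cases h : 0 < n
    · unfold lockLoop
      rw [bitsLoop_pos bit h]
      simp only [h, if_true, band_one_eq_emod, shiftRight_one_eq]
      have hp : (1:Int) <<< bit.toNat = 2 ^ bit.toNat := by simp [Int.shiftLeft_eq]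
      by_cases hm2 : n % 2 = 1
      · simp only [hm2, if_true, hp]
        rw [ih (n / 2) (bit + 1) (pfx + 2 ^ bit.toNat)
              (total + (PySem.Int.floordiv (bit * 2 ^ bit.toNat) 2 + 1 + pfx)) (by omega)]
        rw [PySem.Int.floordiv_eq_ediv_of_pos (by norm_num)]
        simp only [List.singleton_append, payoff, hVal]
        ring
      · simp only [hm2, if_false]
        rw [ih (n / 2) (bit + 1) pfx total (by omega)]
        simp
    · unfold lockLoop bitsLoop
      simp [h, payoff]

theorem hVal_zero : hVal 0 = 1 := by decide

theorem hVal_succ (s : Nat) : hVal ((s + 1 : Nat) : Int) = hVal (s : Int) * 2 + (2 ^ s - 1) := by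
  have hdvd : (2:Int) ∣ (s : Int) * 2 ^ s := by
    cases s with
    | zero => simp
    | succ k => exact Dvd.dvd.mul_left ⟨2 ^ k, by ring⟩ _
  have h1 : ((s : Int) * 2 ^ s / 2) * 2 = (s : Int) * 2 ^ s := Int.ediv_mul_cancel hdvd
  have h2 : ((s + 1 : Nat) : Int) * 2 ^ ((s + 1 : Nat)) / 2 = ((s : Int) + 1) * 2 ^ s := by
    have h3 : ((s + 1 : Nat) : Int) * 2 ^ (s + 1) = (((s : Int) + 1) * 2 ^ s) * 2 := by
      push_cast; ring
    rw [h3, Int.mul_ediv_cancel _ (by norm_num)]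
  unfold hVal
  rw [Int.toNat_natCast, Int.toNat_natCast, h2]
  linarith [h1]

theorem histTake_eq : ∀ (m s : Nat),
    histTake m (hVal (s : Int)) (2 ^ s - 1) =
      (List.range m).map (fun i => hVal ((s + i : Nat) : Int)) := by
  intro m
  induction m with
  | zero => intro s; simp [histTake]
  | succ m ih =>
    intro s
    rw [histTake]
    have hh : hVal (s : Int) * 2 + (2 ^ s - 1) = hVal ((s + 1 : Nat) : Int) :=
      (hVal_succ s).symm
    have ho : ((2:Int) ^ s - 1) * 2 + 1 = 2 ^ (s + 1) - 1 := by ring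
    rw [hh, ho, ih (s + 1), List.range_succ_eq_map]
    simp only [List.map_cons, List.map_map, Nat.add_zero]
    congr 1
    apply List.map_congr_left
    intro i _
    simp only [Function.comp_apply]
    congr 2
    omega

theorem histTake_lookup (m : Nat) (b : Int) (hb : 0 ≤ b) (hbm : b.toNat < m) :
    PySem.List.pyGetD (histTake m 1 0) b 0 = hVal b := by
  have h0 : histTake m 1 0 = (List.range m).map (fun i => hVal ((i : Nat) : Int)) := by
    have := histTake_eq m 0
    simpa [hVal_zero] using this
  rw [h0]
  conv_lhs => rw [show b = ((b.toNat : Nat) : Int) by omega]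
  rw [PySem.List.pyGetD_natCast, PySem.List.getD_map_range _ _ _ _ hbm]
  congr 1
  omega

theorem foldl_enumerate_phi (H : List Int) :
    ∀ (ys : List Int) (s acc : Int),
    (∀ y ∈ ys, PySem.List.pyGetD H y 0 = hVal y) →
    (PySem.List.enumerate ys s).foldl
      (fun acc lb => acc + PySem.List.pyGetD H lb.2 0 + lb.1 * 2 ^ lb.2.toNat) acc
      = acc + phi ys s := by
  intro ys
  induction ys with
  | nil => intro s acc _; simp [PySem.List.enumerate_nil, phi]
  | cons y ys ih =>
    intro s acc hy
    rw [PySem.List.enumerate_cons, List.foldl_cons]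
    rw [ih (s + 1) _ (fun z hz => hy z (List.mem_cons_of_mem _ hz))]
    rw [hy y (List.mem_cons_self)]
    simp [phi]
    ring

theorem phi_append (bs : List Int) : ∀ (as_ : List Int) (l : Int),
    phi (as_ ++ bs) l = phi as_ l + phi bs (l + as_.length) := by
  intro as_
  induction as_ with
  | nil => intro l; simp [phi]
  | cons a t ih =>
    intro l
    simp only [List.cons_append, phi, ih (l + 1), List.length_cons]
    push_cast
    ring_nf

theorem payoff_shift : ∀ (xs : List Int) (p q : Int),
    payoff xs (p + q) = payoff xs p + xs.length * q := by
  intro xs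
  induction xs with
  | nil => intro p q; simp [payoff]
  | cons x t ih =>
    intro p q
    simp only [payoff, List.length_cons]
    have : p + q + 2 ^ x.toNat = (p + 2 ^ x.toNat) + q := by ring
    rw [this, ih]
    push_cast
    ring

theorem phi_reverse : ∀ (xs : List Int) (l : Int),
    phi xs.reverse l = payoff xs 0 + l * weight xs := by
  intro xs
  induction xs with
  | nil => intro l; simp [phi, payoff, weight]
  | cons x t ih =>
    intro l
    rw [List.reverse_cons, phi_append, ih]
    simp only [phi, payoff, weight, List.map_cons, List.sum_cons, List.length_reverse]
    rw [payoff_shift t 0 (2 ^ x.toNat)]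
    ring

-- ===== VERDICT (by name: the statement is the Claim_ definition above) =====
theorem lock_histories_spec : Claim_equal_lock_histories := by
  intro number _
  unfold Spec_lock_histories lock_histories lock_histories_alt
  by_cases hneg : number < 0
  · simp [hneg]
  · simp only [hneg, if_false]
    by_cases h0 : number = 0
    · simp [h0]
    · have hpos : 0 < number := by omega
      simp only [h0, if_false]
      -- the ascending bit list and its facts
      set bits := bitsLoop number 0 with hbits
      have hne : bits ≠ [] := bitsLoop_ne_nil number.toNat number 0 le_rfl hpos
      have hsorted : bits.Pairwise (· < ·) := bitsLoop_sorted number.toNat number 0 le_rfl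
      have hnonneg : ∀ x ∈ bits, 0 ≤ x := bitsLoop_le number.toNat number 0 le_rfl
      -- the reversed list starts with the maximal bit
      obtain ⟨y, t, hyt⟩ := List.exists_cons_of_ne_nil (fun h => hne (List.reverse_eq_nil_iff.mp h))
      have hrevsorted : (bits.reverse).Pairwise (fun a b => b < a) :=
        List.pairwise_reverse.mpr hsorted
      have hmax : ∀ x ∈ bits.reverse, x ≤ y := by
        intro x hx
        rw [hyt] at hx hrevsorted
        rcases List.mem_cons.mp hx with rfl | hx
        · exact le_rfl
        · exact le_of_lt ((List.pairwise_cons.mp hrevsorted).1 x hx)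
      have hy0 : 0 ≤ y := by
        apply hnonneg
        rw [← List.mem_reverse, hyt]
        exact List.mem_cons_self
      have hhead : PySem.List.pyGetD bits.reverse 0 0 = y := by
        rw [hyt]; exact PySem.List.pyGetD_zero_cons y t 0
      rw [hhead]
      -- every bit index is in range of the histories table
      have hlookup : ∀ x ∈ bits.reverse,
          PySem.List.pyGetD (histTake (y + 1).toNat 1 0) x 0 = hVal x := by
        intro x hx
        have hx0 : 0 ≤ x := hnonneg x (List.mem_reverse.mp hx)
        exact histTake_lookup _ x hx0 (by have := hmax x hx; omega)
      rw [foldl_enumerate_phi _ bits.reverse 0 0 hlookup, phi_reverse]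
      rw [lockLoop_eq number.toNat number 0 0 0 le_rfl]
      ring
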